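-- pv_equiv track=rewrite | github.com/takecap/70puzzles | src/q51.py | count
-- ===== SOURCE A (Python) =====
-- def shuffle(sequence):
--   n = len(sequence) // 2
--   seq0 = sequence[:n]
--   seq1 = sequence[n:]
--   result = ()
--   for n0, n1 in zip(seq0, seq1):
--     result += (n0, n1)
--   return result
--
-- def count(n):
--   goal = tuple(i for i in range(2 * n))
--   seq = tuple(i for i in range(2 * n))
--   step = 0
--   while True:
--     seq = shuffle(seq)
--     step += 1
--     if seq == goal or step > 2 * n - 2:
--       return step
-- ===== SOURCE B (Python) =====
-- def count(n):
--     # Number of perfect out-shuffles to restore a 2n-card deck, capped at 2n-1: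
--     # the shuffle is multiplication by 2 modulo 2n-1, so track the single
--     # residue 2**step % (2n-1) instead of simulating the whole deck.
--     m = 2 * n - 1
--     if m <= 1:
--         return 1
--     step = 1
--     p = 2 % m
--     while p != 1 and step <= 2 * n - 2:
--         p = 2 * p % m
--         step += 1
--     return step
-- ===== Notes on version B (the rewrite author's own statement) =====
-- stated objective: faster
-- what changed: Instead of simulating the whole 2n-card deck each step (building a new tuple per shuffle), B uses the fact that a perfect out-shuffle is multiplication by 2 modulo 2n-1 and iterates a single residue 2^step mod (2n-1) until it returns to 1, with the same 2n-1 cap.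
import Mathlib
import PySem

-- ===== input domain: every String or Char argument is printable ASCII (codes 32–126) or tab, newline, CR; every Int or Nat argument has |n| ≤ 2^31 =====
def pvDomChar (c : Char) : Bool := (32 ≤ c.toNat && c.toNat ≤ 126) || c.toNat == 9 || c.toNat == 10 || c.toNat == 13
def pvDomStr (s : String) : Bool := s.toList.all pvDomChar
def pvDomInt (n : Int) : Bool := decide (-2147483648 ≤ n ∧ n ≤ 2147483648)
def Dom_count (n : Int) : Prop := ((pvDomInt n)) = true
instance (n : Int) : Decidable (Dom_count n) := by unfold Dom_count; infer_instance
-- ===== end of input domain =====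

-- B replaces A's full-deck simulation (one new tuple per shuffle) by iterating the single
-- residue 2^step mod (2n-1) — a perfect out-shuffle is multiplication by 2 modulo 2n-1.

-- ===== PORT A =====
def shuffleA (s : List Int) : List Int :=
  let n := s.length / 2
  ((s.take n).zip (s.drop n)).foldl (fun r p => r ++ [p.1, p.2]) []

def loopA (goal : List Int) (n : Int) : Nat → List Int → Int → Int
  | 0, _, step => step
  | fuel+1, seq, step =>
    let seq' := shuffleA seq
    let step' := step + 1
    if seq' = goal ∨ step' > 2*n - 2 then step' else loopA goal n fuel seq' step'

def count (n : Int) : Int :=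
  let goal := PySem.List.pyRange 0 (2*n) 1
  loopA goal n ((2*n - 1).toNat + 1) goal 0

-- ===== PORT B =====
def loopB (n : Int) : Nat → Int → Int → Int
  | 0, _, step => step
  | fuel+1, p, step =>
    if p ≠ 1 ∧ step ≤ 2*n - 2 then loopB n fuel (PySem.Int.mod (2*p) (2*n - 1)) (step + 1)
    else step

def count_alt (n : Int) : Int :=
  let m := 2*n - 1
  if m ≤ 1 then 1
  else loopB n ((2*n - 1).toNat + 1) (PySem.Int.mod 2 m) 1

-- ===== PRECONDITION & SPEC =====
def Spec_count (n : Int) (out : Int) : Prop := out = count_alt n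
instance (n : Int) (out : Int) : Decidable (Spec_count n out) := by unfold Spec_count; infer_instance

-- ===== CLAIM (what is proved, stated in full; the proofs are below) =====
def Claim_equal_count : Prop := ∀ (n : Int), Dom_count n → Spec_count n (count n)

-- ===== LEMMAS AND PROOFS =====

-- position j of the deck after one shuffle holds the card that was at gfun N j
def gfun (N j : Nat) : Nat := if j % 2 = 0 then j / 2 else N + j / 2

def gIter (N : Nat) : Nat → Nat → Nat
  | 0, j => j
  | k+1, j => gIter N k (gfun N j)

-- the deck after k shuffles, starting from the identity deck 0,1,…,2N-1
def seqk (N k : Nat) : List Int := (List.range (2*N)).map (fun j => ((gIter N k j : Nat) : Int))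

lemma flatMap_pairs (a b : Nat → Int) (N : Nat) :
    (List.range N).flatMap (fun i => [a i, b i])
      = (List.range (2*N)).map (fun j => if j % 2 = 0 then a (j/2) else b (j/2)) := by
  induction N with
  | zero => simp
  | succ N ih =>
    rw [List.range_succ, show 2*(N+1) = 2*N+1+1 by ring, List.range_succ, List.range_succ]
    simp only [List.flatMap_append, List.map_append, ih, List.flatMap_cons, List.flatMap_nil,
      List.map_cons, List.map_nil, List.append_assoc]
    have h1 : (2*N) % 2 = 0 := by omega
    have h2 : (2*N) / 2 = N := by omega
    have h3 : (2*N+1) % 2 = 1 := by omega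
    have h4 : (2*N+1) / 2 = N := by omega
    simp [h1, h2, h3, h4]

lemma shuffle_map (N : Nat) (f : Nat → Int) :
    shuffleA ((List.range (2*N)).map f) = (List.range (2*N)).map (fun j => f (gfun N j)) := by
  unfold shuffleA
  have hsplit : List.range (2*N) = List.range N ++ (List.range N).map (N + ·) := by
    rw [show 2*N = N + N by ring, List.range_add]
  have hlen : ((List.range (2*N)).map f).length / 2 = N := by simp
  rw [hlen, PySem.List.foldl_append_eq_flatMap]
  have htake : ((List.range (2*N)).map f).take N = (List.range N).map f := by
    rw [hsplit, List.map_append, List.take_append]; simp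
  have hdrop : ((List.range (2*N)).map f).drop N = (List.range N).map (fun i => f (N + i)) := by
    rw [hsplit, List.map_append, List.drop_append,
      List.drop_eq_nil_of_le (by simp : (List.map f (List.range N)).length ≤ N)]
    simp [List.map_map, Function.comp]
  rw [htake, hdrop, List.zip_map', List.flatMap_map]
  rw [flatMap_pairs f (fun i => f (N + i)) N]
  simp only [List.nil_append]
  apply List.map_congr_left
  intro j _
  unfold gfun
  by_cases h : j % 2 = 0 <;> simp [h]

lemma shuffle_seqk (N k : Nat) : shuffleA (seqk N k) = seqk N (k+1) := by
  unfold seqk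
  rw [shuffle_map]
  simp [gIter]

lemma gfun_fix (N : Nat) (hN : 1 ≤ N) : gfun N (2*N - 1) = 2*N - 1 := by
  unfold gfun
  have h : (2*N - 1) % 2 = 1 := by omega
  simp [h]
  omega

lemma gfun_lt (N j : Nat) (hN : 2 ≤ N) (hj : j < 2*N - 1) : gfun N j < 2*N - 1 := by
  unfold gfun
  split <;> omega

lemma gfun_modeq (N j : Nat) (hN : 1 ≤ N) (hj : j < 2*N) :
    2 * gfun N j ≡ j [MOD 2*N - 1] ∧ gfun N j < 2*N := by
  by_cases h : j % 2 = 0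
  · have e : gfun N j = j / 2 := by unfold gfun; simp [h]
    have e2 : 2 * (j / 2) = j := by omega
    exact ⟨by rw [e, e2], by rw [e]; omega⟩
  · have e : gfun N j = N + j / 2 := by unfold gfun; simp [h]
    have e2 : 2 * (N + j / 2) = (2*N - 1) + j := by omega
    refine ⟨?_, by rw [e]; omega⟩
    rw [e, e2]
    show ((2*N - 1) + j) % (2*N - 1) = j % (2*N - 1)
    exact Nat.add_mod_left _ _

lemma gIter_fix (N k : Nat) (hN : 1 ≤ N) : gIter N k (2*N - 1) = 2*N - 1 := by
  induction k with
  | zero => rfl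
  | succ k ih => show gIter N k (gfun N (2*N - 1)) = 2*N - 1; rw [gfun_fix N hN]; exact ih

lemma gIter_lt (N k j : Nat) (hN : 2 ≤ N) (hj : j < 2*N - 1) : gIter N k j < 2*N - 1 := by
  induction k generalizing j with
  | zero => exact hj
  | succ k ih => exact ih _ (gfun_lt N j hN hj)

lemma gIter_modeq (N k j : Nat) (hN : 1 ≤ N) (hj : j < 2*N) :
    2^k * gIter N k j ≡ j [MOD 2*N - 1] ∧ gIter N k j < 2*N := by
  induction k generalizing j with
  | zero => exact ⟨by simpa using Nat.ModEq.refl j, hj⟩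
  | succ k ih =>
    obtain ⟨h1, h2⟩ := gfun_modeq N j hN hj
    obtain ⟨ih1, ih2⟩ := ih (gfun N j) h2
    refine ⟨?_, ih2⟩
    show 2^(k+1) * gIter N k (gfun N j) ≡ j [MOD 2*N - 1]
    have e : 2^(k+1) * gIter N k (gfun N j) = 2 * (2^k * gIter N k (gfun N j)) := by ring
    rw [e]
    exact (ih1.mul_left 2).trans h1

-- the deck is restored after k shuffles iff 2^k ≡ 1 (mod 2N-1)
lemma key (N k : Nat) (hN : 2 ≤ N) :
    seqk N k = seqk N 0 ↔ 2^k % (2*N - 1) = 1 := by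
  unfold seqk
  rw [List.map_inj_left]
  constructor
  · intro h
    have h1 : gIter N k 1 = gIter N 0 1 := by
      have := h 1 (by rw [List.mem_range]; omega)
      exact_mod_cast this
    have h2 : gIter N k 1 = 1 := h1
    have := (gIter_modeq N k 1 (by omega) (by omega)).1
    rw [h2, Nat.mul_one] at this
    calc 2^k % (2*N - 1) = 1 % (2*N - 1) := this
      _ = 1 := Nat.mod_eq_of_lt (by omega)
  · intro h2k j hj
    rw [List.mem_range] at hj
    have : gIter N k j = j := by
      rcases (by omega : j = 2*N - 1 ∨ j < 2*N - 1) with hc | hc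
      · rw [hc]; exact gIter_fix N k (by omega)
      · have hm1 := (gIter_modeq N k j (by omega) hj).1
        have hlt := gIter_lt N k j hN hc
        have h1 : (2:ℕ)^k ≡ 1 [MOD 2*N - 1] := by
          show 2^k % (2*N - 1) = 1 % (2*N - 1)
          rw [h2k, Nat.mod_eq_of_lt (by omega)]
        have hmod : gIter N k j ≡ j [MOD 2*N - 1] := by
          have := (h1.mul_right (gIter N k j)).symm.trans hm1
          rwa [Nat.one_mul] at this
        have := hmod
        unfold Nat.ModEq at this
        rw [Nat.mod_eq_of_lt hlt, Nat.mod_eq_of_lt (by omega)] at this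
        exact this
    rw [this]
    rfl

lemma loops_agree (n : Int) (hn : 2 ≤ n) (f k : Nat)
    (hk : (k : Int) < 2*n - 1) (hf : 2*n - 1 ≤ (f : Int) + (k : Int)) :
    loopA (seqk n.toNat 0) n f (seqk n.toNat k) (k : Int)
      = loopB n f (((2^(k+1) % (2*n.toNat - 1) : Nat) : Int)) ((k : Int) + 1) := by
  induction f generalizing k with
  | zero => exfalso; simp at hf; omega
  | succ f ih =>
    have hN : 2 ≤ n.toNat := by omega
    have hNn : ((n.toNat : Int)) = n := by omega
    have hmI : (2*n - 1) = ((2*n.toNat - 1 : Nat) : Int) := by omega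
    have hcond : (shuffleA (seqk n.toNat k) = seqk n.toNat 0)
        ↔ ((2^(k+1) % (2*n.toNat - 1) : Nat) : Int) = 1 := by
      rw [shuffle_seqk, key n.toNat (k+1) hN]
      norm_cast
    simp only [loopA, loopB]
    by_cases hc : ((2^(k+1) % (2*n.toNat - 1) : Nat) : Int) = 1 ∨ (k : Int) + 1 > 2*n - 2
    · rw [if_pos, if_neg]
      · omega
      · exact Or.imp hcond.mpr id (by tauto)
    · push Not at hc
      obtain ⟨hc1, hc2⟩ := hc
      rw [if_neg, if_pos ⟨hc1, hc2⟩]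
      · -- recurse on both sides
        have hmodstep : PySem.Int.mod (2 * ((2^(k+1) % (2*n.toNat - 1) : Nat) : Int)) (2*n - 1)
            = ((2^(k+2) % (2*n.toNat - 1) : Nat) : Int) := by
          rw [PySem.Int.mod_eq_emod_of_pos (by omega : (0:Int) < 2*n - 1), hmI]
          have e : (2 * ((2^(k+1) % (2*n.toNat - 1) : Nat) : Int))
              = (((2 * (2^(k+1) % (2*n.toNat - 1)) : Nat)) : Int) := by push_cast; ring
          rw [e, ← Int.natCast_emod]
          congr 1
          conv_rhs => rw [show k+2 = (k+1)+1 by ring, pow_succ, Nat.mul_mod]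
          rw [Nat.mul_mod, Nat.mod_mod_of_dvd _ dvd_rfl, Nat.mul_comm]
        have := ih (k+1) (by push_cast; omega) (by push_cast at hf ⊢; omega)
        rw [shuffle_seqk]
        push_cast at this
        rw [hmodstep]
        convert this using 2
      · rw [not_or]
        exact ⟨fun h => hc1 (hcond.mp h), by omega⟩
  

lemma goal_eq_seqk (n : Int) (hn : 2 ≤ n) :
    PySem.List.pyRange 0 (2*n) 1 = seqk n.toNat 0 := by
  rw [PySem.List.pyRange_one]
  unfold seqk
  have h : (2*n - 0).toNat = 2 * n.toNat := by omega
  rw [h]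
  apply List.map_congr_left
  intro j _
  simp [gIter]

lemma count_eq_big (n : Int) (hn : 2 ≤ n) : count n = count_alt n := by
  unfold count count_alt
  rw [goal_eq_seqk n hn]
  rw [if_neg (by omega : ¬ (2*n - 1 ≤ 1))]
  have h0 := loops_agree n hn ((2*n - 1).toNat + 1) 0 (by omega)
    (by push_cast; omega)
  simp only [Nat.cast_zero, zero_add] at h0
  rw [h0]
  congr 1
  · rw [PySem.Int.mod_eq_emod_of_pos (by omega : (0:Int) < 2*n - 1),
      Int.emod_eq_of_lt (by omega) (by omega)]
    rw [pow_one, Nat.mod_eq_of_lt (by omega)]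
    rfl

lemma count_eq_nonpos (n : Int) (hn : n ≤ 0) : count n = count_alt n := by
  unfold count count_alt
  rw [PySem.List.pyRange_one_eq_nil (by omega : 2*n ≤ 0),
    show (2*n - 1).toNat = 0 by omega]
  rw [if_pos (by omega : 2*n - 1 ≤ 1)]
  simp [loopA, shuffleA]

-- ===== VERDICT (by name: the statement is the Claim_ definition above) =====
theorem count_spec : Claim_equal_count := by
  intro n _
  unfold Spec_count
  rcases (by omega : n ≤ 0 ∨ n = 1 ∨ 2 ≤ n) with h | h | h
  · exact count_eq_nonpos n h
  · subst h; decide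
  · exact count_eq_big n h
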